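-- pv_equiv track=rewrite | github.com/Ninjax26/f1-pit-strategy-ml | src/sim/strategy_sim.py | generate_strategies
-- ===== SOURCE A (Python) =====
-- def generate_strategies(
--     total_laps: int,
--     compounds: list[str],
--     max_stops: int,
--     min_stint: int,
--     max_stint: int,
--     step: int,
--     require_two_compounds: bool,
-- ) -> dict[str, list[tuple[str, int]]]:
--     strategies: dict[str, list[tuple[str, int]]] = {}
--
--     if max_stint <= 0:
--         max_stint = total_laps
--
--     # One-stop (2 stints)
--     if max_stops >= 1:
--         for c1 in compounds:
--             for c2 in compounds:
--                 if require_two_compounds and c1 == c2: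
--                     continue
--                 for s1 in range(min_stint, total_laps - min_stint + 1, step):
--                     s2 = total_laps - s1
--                     if s2 < min_stint or s2 > max_stint:
--                         continue
--                     name = f"1stop_{c1[0]}-{c2[0]}_{s1}-{s2}"
--                     strategies[name] = [(c1, s1), (c2, s2)]
--
--     # Two-stop (3 stints)
--     if max_stops >= 2:
--         for c1 in compounds:
--             for c2 in compounds:
--                 for c3 in compounds:
--                     if require_two_compounds and len({c1, c2, c3}) < 2:
--                         continue
--                     for s1 in range(min_stint, total_laps - 2 * min_stint + 1, step):
--                         for s2 in range(min_stint, total_laps - s1 - min_stint + 1, step):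
--                             s3 = total_laps - s1 - s2
--                             if s3 < min_stint or s3 > max_stint:
--                                 continue
--                             name = f"2stop_{c1[0]}-{c2[0]}-{c3[0]}_{s1}-{s2}-{s3}"
--                             strategies[name] = [(c1, s1), (c2, s2), (c3, s3)]
--
--     return strategies
-- ===== SOURCE B (Python) =====
-- def generate_strategies(
--     total_laps: int,
--     compounds: list[str],
--     max_stops: int,
--     min_stint: int,
--     max_stint: int,
--     step: int,
--     require_two_compounds: bool,
-- ) -> dict[str, list[tuple[str, int]]]:
--     # The stint-length splits do not depend on the compounds, so enumerate them ONCE per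
--     # stint count (with a generic recursive enumerator) and combine them with a lazy
--     # product of compound tuples, instead of A's two hard-coded nested-loop blocks that
--     # re-run the range scans for every compound pair/triple.
--     if max_stint <= 0:
--         max_stint = total_laps
--     out: dict[str, list[tuple[str, int]]] = {}
--
--     def splits(remaining, laps_left):
--         # all stint-length tuples; only the FINAL stint is bounded by max_stint
--         if remaining == 1:
--             return [(laps_left,)] if min_stint <= laps_left <= max_stint else []
--         return [(s,) + rest
--                 for s in range(min_stint, laps_left - (remaining - 1) * min_stint + 1, step)
--                 for rest in splits(remaining - 1, laps_left - s)]
--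
--     def combos(n):
--         if n == 1:
--             for c in compounds:
--                 yield (c,)
--         else:
--             for rest in combos(n - 1):
--                 for c in compounds:
--                     yield rest + (c,)
--
--     for n in (2, 3):
--         if max_stops >= n - 1:
--             valid = [combo for combo in combos(n)
--                      if not (require_two_compounds and len(set(combo)) < 2)]
--             if not valid:
--                 continue
--             slist = [(lens, "-".join(map(str, lens))) for lens in splits(n, total_laps)]
--             if not slist:
--                 continue
--             for combo in valid:
--                 pfx = f"{n - 1}stop_" + "-".join(c[0] for c in combo) + "_"
--                 for lens, suffix in slist:
--                     out[pfx + suffix] = list(zip(combo, lens))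
--     return out
-- ===== Notes on version B (the rewrite author's own statement) =====
-- stated objective: alternative
-- what changed: The stint-length splits do not depend on the compounds, so B enumerates them once per stint count with a generic recursive enumerator (with per-split name suffixes) and combines them with a recursive product of compound tuples, instead of A's two hard-coded nested-loop blocks that re-run the range scans for every compound pair/triple; Pre_ excludes exactly the inputs where A (and B) raise (step=0 reaching a range, or an empty-string compound reaching a name build).
import Mathlib
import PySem

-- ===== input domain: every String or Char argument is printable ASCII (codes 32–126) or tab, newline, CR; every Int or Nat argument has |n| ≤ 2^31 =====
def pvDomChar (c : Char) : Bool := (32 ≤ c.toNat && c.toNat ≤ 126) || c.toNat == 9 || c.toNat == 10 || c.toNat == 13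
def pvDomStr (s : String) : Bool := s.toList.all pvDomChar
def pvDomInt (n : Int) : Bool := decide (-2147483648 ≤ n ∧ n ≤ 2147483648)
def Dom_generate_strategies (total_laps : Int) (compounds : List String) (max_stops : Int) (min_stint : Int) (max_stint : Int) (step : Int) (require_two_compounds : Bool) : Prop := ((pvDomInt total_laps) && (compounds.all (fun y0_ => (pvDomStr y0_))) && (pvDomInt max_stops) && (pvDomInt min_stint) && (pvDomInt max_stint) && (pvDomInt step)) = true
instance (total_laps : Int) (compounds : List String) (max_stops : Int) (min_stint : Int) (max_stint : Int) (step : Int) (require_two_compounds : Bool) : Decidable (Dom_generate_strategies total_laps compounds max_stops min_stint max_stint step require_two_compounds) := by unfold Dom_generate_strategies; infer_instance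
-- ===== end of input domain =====

-- ===== PORT A =====
-- B restates A as one generic recursive stint enumerator driven by a compound-tuple product,
-- instead of A's two hard-coded nested-loop blocks (objective: alternative decomposition).
-- s[0] (first letter of a compound); total form of c[0], exact when c ≠ "" (Pre_ guarantees
-- c[0] is only reached on nonempty compounds)
def pvFirst (c : String) : String := String.ofList (((PySem.Str.pyGet? c 0).map (fun ch => [ch])).getD [])

def generate_strategies (total_laps : Int) (compounds : List String) (max_stops : Int) (min_stint : Int) (max_stint : Int) (step : Int) (require_two_compounds : Bool) : List (String × List (String × Int)) :=
  let mx : Int := if max_stint ≤ 0 then total_laps else max_stint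
  let d0 : PySem.Dict String (List (String × Int)) := PySem.Dict.empty
  -- One-stop (2 stints)
  let d1 :=
    if max_stops ≥ 1 then
      compounds.foldl (fun d c1 =>
        compounds.foldl (fun d c2 =>
          if require_two_compounds && (c1 == c2) then d
          else
            (PySem.List.pyRange min_stint (total_laps - min_stint + 1) step).foldl (fun d s1 =>
              let s2 := total_laps - s1
              if s2 < min_stint ∨ s2 > mx then d
              else d.insert ("1stop_" ++ pvFirst c1 ++ "-" ++ pvFirst c2 ++ "_" ++
                              PySem.Int.toStr s1 ++ "-" ++ PySem.Int.toStr s2)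
                            [(c1, s1), (c2, s2)]) d) d) d0
    else d0
  -- Two-stop (3 stints)
  let d2 :=
    if max_stops ≥ 2 then
      compounds.foldl (fun d c1 =>
        compounds.foldl (fun d c2 =>
          compounds.foldl (fun d c3 =>
            if require_two_compounds && decide ((PySem.Set.ofList [c1, c2, c3]).length < 2) then d
            else
              (PySem.List.pyRange min_stint (total_laps - 2 * min_stint + 1) step).foldl (fun d s1 =>
                (PySem.List.pyRange min_stint (total_laps - s1 - min_stint + 1) step).foldl (fun d s2 =>
                  let s3 := total_laps - s1 - s2
                  if s3 < min_stint ∨ s3 > mx then d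
                  else d.insert ("2stop_" ++ pvFirst c1 ++ "-" ++ pvFirst c2 ++ "-" ++ pvFirst c3 ++ "_" ++
                                  PySem.Int.toStr s1 ++ "-" ++ PySem.Int.toStr s2 ++ "-" ++ PySem.Int.toStr s3)
                                [(c1, s1), (c2, s2), (c3, s3)]) d) d) d) d) d1
    else d1
  d2.items

-- ===== PORT B =====
-- Source B's splits: all stint-length tuples for a given stint count; bottoms out at remaining = 1
-- (splits is only ever called with remaining ≥ 1, so the 0 arm is never reached)
def pvSplits (min_stint max_stint step : Int) : Nat → Int → List (List Int)
  | 0, _ => []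
  | 1, laps_left => if min_stint ≤ laps_left ∧ laps_left ≤ max_stint then [[laps_left]] else []
  | r + 2, laps_left =>
      (PySem.List.pyRange min_stint (laps_left - ((r : Int) + 1) * min_stint + 1) step).flatMap
        (fun s => (pvSplits min_stint max_stint step (r + 1) (laps_left - s)).map (fun rest => s :: rest))

-- Source B's generator combos(n) = product(compounds, repeat=n), last coordinate varying fastest
def pvCombos (compounds : List String) : Nat → List (List String)
  | 0 => [[]]
  | 1 => compounds.map (fun c => [c])
  | n + 2 => (pvCombos compounds (n + 1)).flatMap (fun rest => compounds.map (fun c => rest ++ [c]))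

-- Source B's main loop; the per-combo name prefix pfx is written inline in the insert key
def generate_strategies_alt (total_laps : Int) (compounds : List String) (max_stops : Int) (min_stint : Int) (max_stint : Int) (step : Int) (require_two_compounds : Bool) : List (String × List (String × Int)) :=
  let mx : Int := if max_stint ≤ 0 then total_laps else max_stint
  (([2, 3] : List Nat).foldl (fun d (n : Nat) =>
    if max_stops ≥ (↑n : Int) - 1 then
      let valid := (pvCombos compounds n).filter
        (fun combo => !(require_two_compounds && decide ((PySem.Set.ofList combo).length < 2)))
      if valid = [] then d
      else
        let slist := (pvSplits min_stint mx step n total_laps).map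
          (fun lens => (lens, PySem.Str.join "-" (lens.map PySem.Int.toStr)))
        if slist = [] then d
        else
          valid.foldl (fun d combo =>
            slist.foldl (fun d p =>
              d.insert ((PySem.Int.toStr ((↑n : Int) - 1) ++ "stop_" ++
                          PySem.Str.join "-" (combo.map pvFirst) ++ "_") ++ p.2)
                        (combo.zip p.1)) d) d
    else d) PySem.Dict.empty).items

-- ===== PRECONDITION & SPEC =====
-- Pre_ excludes exactly the inputs on which the Python A raises: ValueError (step = 0 once a
-- range() is reached, i.e. some compound pair survives the require_two skip) and IndexError
-- (c[0] on an empty-string compound, reached exactly when an unskipped combo containing ""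
-- meets a nonempty set of stint splits); everywhere A returns, Pre_ admits the input.
def Pre_generate_strategies (total_laps : Int) (compounds : List String) (max_stops : Int) (min_stint : Int) (max_stint : Int) (step : Int) (require_two_compounds : Bool) : Prop :=
  ¬ ((max_stops ≥ 1 ∧ (compounds ≠ [] ∧ (require_two_compounds = true → ∃ x ∈ compounds, ∃ y ∈ compounds, x ≠ y)) ∧
        (step = 0 ∨ ("" ∈ compounds ∧
          ∃ s1 ∈ PySem.List.pyRange min_stint (total_laps - min_stint + 1) step,
            min_stint ≤ total_laps - s1 ∧ total_laps - s1 ≤ (if max_stint ≤ 0 then total_laps else max_stint))))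
   ∨ (max_stops ≥ 2 ∧ (compounds ≠ [] ∧ (require_two_compounds = true → ∃ x ∈ compounds, ∃ y ∈ compounds, x ≠ y)) ∧
        step ≠ 0 ∧ "" ∈ compounds ∧
          ∃ s1 ∈ PySem.List.pyRange min_stint (total_laps - 2 * min_stint + 1) step,
          ∃ s2 ∈ PySem.List.pyRange min_stint (total_laps - s1 - min_stint + 1) step,
            min_stint ≤ total_laps - s1 - s2 ∧ total_laps - s1 - s2 ≤ (if max_stint ≤ 0 then total_laps else max_stint)))
instance (total_laps : Int) (compounds : List String) (max_stops : Int) (min_stint : Int) (max_stint : Int) (step : Int) (require_two_compounds : Bool) : Decidable (Pre_generate_strategies total_laps compounds max_stops min_stint max_stint step require_two_compounds) := by unfold Pre_generate_strategies; infer_instance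

def pvWitness_generate_strategies : Int × List String × Int × Int × Int × Int × Bool :=
  (10, ["S", "M"], 2, 3, 0, 2, true)

def Spec_generate_strategies (total_laps : Int) (compounds : List String) (max_stops : Int) (min_stint : Int) (max_stint : Int) (step : Int) (require_two_compounds : Bool) (out : List (String × List (String × Int))) : Prop := out = generate_strategies_alt total_laps compounds max_stops min_stint max_stint step require_two_compounds
instance (total_laps : Int) (compounds : List String) (max_stops : Int) (min_stint : Int) (max_stint : Int) (step : Int) (require_two_compounds : Bool) (out : List (String × List (String × Int))) : Decidable (Spec_generate_strategies total_laps compounds max_stops min_stint max_stint step require_two_compounds out) := by unfold Spec_generate_strategies; infer_instance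

-- ===== CLAIM (what is proved, stated in full; the proofs are below) =====
def Claim_equal_generate_strategies : Prop := ∀ (total_laps : Int) (compounds : List String) (max_stops : Int) (min_stint : Int) (max_stint : Int) (step : Int) (require_two_compounds : Bool), Dom_generate_strategies total_laps compounds max_stops min_stint max_stint step require_two_compounds → Pre_generate_strategies total_laps compounds max_stops min_stint max_stint step require_two_compounds → Spec_generate_strategies total_laps compounds max_stops min_stint max_stint step require_two_compounds (generate_strategies total_laps compounds max_stops min_stint max_stint step require_two_compounds)

-- ===== LEMMAS AND PROOFS =====

theorem pv_foldl_const {α β : Type} (l : List α) (d : β) : l.foldl (fun d _ => d) d = d := by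
  induction l generalizing d with
  | nil => rfl
  | cons x xs ih => exact ih d

theorem pv_join_two (x y : String) : PySem.Str.join "-" [x, y] = x ++ "-" ++ y := by
  rw [show x ++ "-" ++ y = String.ofList (x ++ "-" ++ y).toList from (String.ofList_toList).symm]
  simp only [PySem.Str.join]
  congr 1
  simp [PySem.Chars.join_cons_cons, PySem.Chars.join_singleton, String.toList_append]

theorem pv_join_three (x y z : String) : PySem.Str.join "-" [x, y, z] = x ++ "-" ++ y ++ "-" ++ z := by
  rw [show x ++ "-" ++ y ++ "-" ++ z = String.ofList (x ++ "-" ++ y ++ "-" ++ z).toList from (String.ofList_toList).symm]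
  simp only [PySem.Str.join]
  congr 1
  simp [PySem.Chars.join_cons_cons, PySem.Chars.join_singleton, String.toList_append]

theorem pv_set_pair (c1 c2 : String) :
    (decide ((PySem.Set.ofList [c1, c2]).length < 2)) = (c1 == c2) := by
  by_cases h : c2 = c1
  · simp [PySem.Set.ofList, PySem.Set.add, PySem.Set.contains, h]
  · simp only [PySem.Set.ofList, List.foldl, PySem.Set.add, PySem.Set.contains]
    simp [h, show c1 ≠ c2 from fun hh => h hh.symm]

theorem pv_name_two (c1 c2 : String) (a b : Int) :
    (PySem.Int.toStr 1 ++ "stop_" ++ PySem.Str.join "-" [c1, c2] ++ "_") ++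
        PySem.Str.join "-" [PySem.Int.toStr a, PySem.Int.toStr b] =
      "1stop_" ++ c1 ++ "-" ++ c2 ++ "_" ++ PySem.Int.toStr a ++ "-" ++ PySem.Int.toStr b := by
  rw [pv_join_two, pv_join_two, show PySem.Int.toStr 1 = "1" from rfl, ← String.append_assoc,
    show ("1" ++ "stop_" : String) = "1stop_" from rfl]
  simp [String.append_assoc]

theorem pv_name_three (c1 c2 c3 : String) (a b c : Int) :
    (PySem.Int.toStr 2 ++ "stop_" ++ PySem.Str.join "-" [c1, c2, c3] ++ "_") ++
        PySem.Str.join "-" [PySem.Int.toStr a, PySem.Int.toStr b, PySem.Int.toStr c] =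
      "2stop_" ++ c1 ++ "-" ++ c2 ++ "-" ++ c3 ++ "_" ++
        PySem.Int.toStr a ++ "-" ++ PySem.Int.toStr b ++ "-" ++ PySem.Int.toStr c := by
  rw [pv_join_three, pv_join_three, show PySem.Int.toStr 2 = "2" from rfl, ← String.append_assoc,
    show ("2" ++ "stop_" : String) = "2stop_" from rfl]
  simp [String.append_assoc]

-- B's hoisted splits fold, reinstated as A's conditional range scan (2 stints)
theorem pv_splits_two (mn mx st tot : Int) (c1 c2 : String)
    (d : PySem.Dict String (List (String × Int))) :
    ((pvSplits mn mx st 2 tot).map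
        (fun lens => (lens, PySem.Str.join "-" (lens.map PySem.Int.toStr)))).foldl
      (fun d p => d.insert
        ((PySem.Int.toStr 1 ++ "stop_" ++ PySem.Str.join "-" [pvFirst c1, pvFirst c2] ++ "_") ++ p.2)
        ([c1, c2].zip p.1)) d =
      (PySem.List.pyRange mn (tot - mn + 1) st).foldl (fun d s1 =>
        if tot - s1 < mn ∨ tot - s1 > mx then d
        else d.insert ("1stop_" ++ pvFirst c1 ++ "-" ++ pvFirst c2 ++ "_" ++
                        PySem.Int.toStr s1 ++ "-" ++ PySem.Int.toStr (tot - s1))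
                      [(c1, s1), (c2, tot - s1)]) d := by
  rw [List.foldl_map]
  show ((PySem.List.pyRange mn (tot - ((0 : Int) + 1) * mn + 1) st).flatMap _).foldl _ d = _
  rw [show tot - ((0 : Int) + 1) * mn + 1 = tot - mn + 1 by ring, List.foldl_flatMap]
  apply PySem.List.foldl_congr_mem
  intro d s _
  rw [List.foldl_map, show (0 : Nat) + 1 = 1 from rfl]
  by_cases h : tot - s < mn ∨ tot - s > mx
  · rw [if_pos h, show pvSplits mn mx st 1 (tot - s) = [] by
      simp only [pvSplits]; rw [if_neg (by omega)]]
    rfl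
  · rw [if_neg h, show pvSplits mn mx st 1 (tot - s) = [[tot - s]] by
      simp only [pvSplits]; rw [if_pos (by omega)]]
    norm_num [List.zip, List.zipWith, pv_name_two]

-- B's hoisted splits fold, reinstated as A's conditional double range scan (3 stints)
theorem pv_splits_three (mn mx st tot : Int) (c1 c2 c3 : String)
    (d : PySem.Dict String (List (String × Int))) :
    ((pvSplits mn mx st 3 tot).map
        (fun lens => (lens, PySem.Str.join "-" (lens.map PySem.Int.toStr)))).foldl
      (fun d p => d.insert
        ((PySem.Int.toStr 2 ++ "stop_" ++ PySem.Str.join "-" [pvFirst c1, pvFirst c2, pvFirst c3] ++ "_") ++ p.2)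
        ([c1, c2, c3].zip p.1)) d =
      (PySem.List.pyRange mn (tot - 2 * mn + 1) st).foldl (fun d s1 =>
        (PySem.List.pyRange mn (tot - s1 - mn + 1) st).foldl (fun d s2 =>
          if tot - s1 - s2 < mn ∨ tot - s1 - s2 > mx then d
          else d.insert ("2stop_" ++ pvFirst c1 ++ "-" ++ pvFirst c2 ++ "-" ++ pvFirst c3 ++ "_" ++
                          PySem.Int.toStr s1 ++ "-" ++ PySem.Int.toStr s2 ++ "-" ++
                          PySem.Int.toStr (tot - s1 - s2))
                        [(c1, s1), (c2, s2), (c3, tot - s1 - s2)]) d) d := by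
  rw [List.foldl_map]
  show ((PySem.List.pyRange mn (tot - ((1 : Int) + 1) * mn + 1) st).flatMap _).foldl _ d = _
  rw [show tot - ((1 : Int) + 1) * mn + 1 = tot - 2 * mn + 1 by ring, List.foldl_flatMap]
  apply PySem.List.foldl_congr_mem
  intro d s1 _
  rw [List.foldl_map]
  show ((PySem.List.pyRange mn ((tot - s1) - ((0 : Int) + 1) * mn + 1) st).flatMap _).foldl _ d = _
  rw [show (tot - s1) - ((0 : Int) + 1) * mn + 1 = tot - s1 - mn + 1 by ring, List.foldl_flatMap]
  apply PySem.List.foldl_congr_mem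
  intro d s2 _
  rw [List.foldl_map, show (0 : Nat) + 1 = 1 from rfl]
  by_cases h : tot - s1 - s2 < mn ∨ tot - s1 - s2 > mx
  · rw [if_pos h, show pvSplits mn mx st 1 (tot - s1 - s2) = [] by
      simp only [pvSplits]; rw [if_neg (by omega)]]
    rfl
  · rw [if_neg h, show pvSplits mn mx st 1 (tot - s1 - s2) = [[tot - s1 - s2]] by
      simp only [pvSplits]; rw [if_pos (by omega)]]
    norm_num [List.zip, List.zipWith, pv_name_three]

theorem pv_combos_two (compounds : List String) :
    pvCombos compounds 2 = compounds.flatMap (fun c1 => compounds.map (fun c2 => [c1, c2])) := by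
  simp only [pvCombos, List.flatMap_map, List.singleton_append]

theorem pv_combos_three (compounds : List String) :
    pvCombos compounds 3 =
      compounds.flatMap (fun c1 => compounds.flatMap (fun c2 => compounds.map (fun c3 => [c1, c2, c3]))) := by
  show (pvCombos compounds 2).flatMap _ = _
  rw [pv_combos_two, List.flatMap_assoc]
  simp only [List.flatMap_map, List.cons_append, List.nil_append]

-- B's filtered combo fold over slist, reinstated as A's one-stop nested loops
theorem pv_stage_one (compounds : List String) (mn mx st tot : Int) (rq : Bool)
    (d : PySem.Dict String (List (String × Int))) :
    ((pvCombos compounds 2).filter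
        (fun combo => !(rq && decide ((PySem.Set.ofList combo).length < 2)))).foldl
      (fun d combo =>
        ((pvSplits mn mx st 2 tot).map
            (fun lens => (lens, PySem.Str.join "-" (lens.map PySem.Int.toStr)))).foldl
          (fun d p => d.insert
            ((PySem.Int.toStr 1 ++ "stop_" ++ PySem.Str.join "-" (combo.map pvFirst) ++ "_") ++ p.2)
            (combo.zip p.1)) d) d =
    compounds.foldl (fun d c1 =>
      compounds.foldl (fun d c2 =>
        if rq && (c1 == c2) then d
        else
          (PySem.List.pyRange mn (tot - mn + 1) st).foldl (fun d s1 =>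
            if tot - s1 < mn ∨ tot - s1 > mx then d
            else d.insert ("1stop_" ++ pvFirst c1 ++ "-" ++ pvFirst c2 ++ "_" ++
                            PySem.Int.toStr s1 ++ "-" ++ PySem.Int.toStr (tot - s1))
                          [(c1, s1), (c2, tot - s1)]) d) d) d := by
  rw [List.foldl_filter, pv_combos_two, List.foldl_flatMap]
  apply PySem.List.foldl_congr_mem
  intro d c1 _
  rw [List.foldl_map]
  apply PySem.List.foldl_congr_mem
  intro d c2 _
  simp only [List.map]
  rw [pv_set_pair]
  cases h : rq && (c1 == c2)
  · simp [pv_splits_two]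
  · simp

-- B's filtered combo fold over slist, reinstated as A's two-stop nested loops
theorem pv_stage_two (compounds : List String) (mn mx st tot : Int) (rq : Bool)
    (d : PySem.Dict String (List (String × Int))) :
    ((pvCombos compounds 3).filter
        (fun combo => !(rq && decide ((PySem.Set.ofList combo).length < 2)))).foldl
      (fun d combo =>
        ((pvSplits mn mx st 3 tot).map
            (fun lens => (lens, PySem.Str.join "-" (lens.map PySem.Int.toStr)))).foldl
          (fun d p => d.insert
            ((PySem.Int.toStr 2 ++ "stop_" ++ PySem.Str.join "-" (combo.map pvFirst) ++ "_") ++ p.2)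
            (combo.zip p.1)) d) d =
    compounds.foldl (fun d c1 =>
      compounds.foldl (fun d c2 =>
        compounds.foldl (fun d c3 =>
          if rq && decide ((PySem.Set.ofList [c1, c2, c3]).length < 2) then d
          else
            (PySem.List.pyRange mn (tot - 2 * mn + 1) st).foldl (fun d s1 =>
              (PySem.List.pyRange mn (tot - s1 - mn + 1) st).foldl (fun d s2 =>
                if tot - s1 - s2 < mn ∨ tot - s1 - s2 > mx then d
                else d.insert ("2stop_" ++ pvFirst c1 ++ "-" ++ pvFirst c2 ++ "-" ++ pvFirst c3 ++ "_" ++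
                                PySem.Int.toStr s1 ++ "-" ++ PySem.Int.toStr s2 ++ "-" ++
                                PySem.Int.toStr (tot - s1 - s2))
                              [(c1, s1), (c2, s2), (c3, tot - s1 - s2)]) d) d) d) d) d := by
  rw [List.foldl_filter, pv_combos_three, List.foldl_flatMap]
  apply PySem.List.foldl_congr_mem
  intro d c1 _
  rw [List.foldl_flatMap]
  apply PySem.List.foldl_congr_mem
  intro d c2 _
  rw [List.foldl_map]
  apply PySem.List.foldl_congr_mem
  intro d c3 _
  simp only [List.map]
  cases h : rq && decide ((PySem.Set.ofList [c1, c2, c3]).length < 2)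
  · simp [pv_splits_three]
  · simp

-- Source B's empty-valid / empty-slist early continues insert nothing, so they collapse to the plain fold
theorem pv_guard_collapse {α β : Type} (valid : List α) (slist : List β)
    (g : α → PySem.Dict String (List (String × Int)) → β → PySem.Dict String (List (String × Int)))
    (d : PySem.Dict String (List (String × Int))) :
    (if valid = [] then d
     else if slist = [] then d
     else valid.foldl (fun d c => slist.foldl (g c) d) d) =
      valid.foldl (fun d c => slist.foldl (g c) d) d := by
  split_ifs with h1 h2
  · rw [h1]; rfl
  · rw [h2]
    simp only [List.foldl_nil]
    rw [pv_foldl_const]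
  · rfl

-- ===== VERDICT (by name: the statement is the Claim_ definition above) =====
theorem generate_strategies_spec : Claim_equal_generate_strategies := by
  intro total_laps compounds max_stops min_stint max_stint step require_two_compounds _ _
  unfold Spec_generate_strategies generate_strategies generate_strategies_alt
  simp only [List.foldl_cons, List.foldl_nil,
    show ((2 : Nat) : Int) - 1 = 1 by norm_num, show ((3 : Nat) : Int) - 1 = 2 by norm_num]
  congr 1
  by_cases h1 : max_stops ≥ 1 <;> by_cases h2 : max_stops ≥ 2 <;>
    simp only [h1, h2, if_pos, if_neg, not_false_iff] <;>
    first
      | rfl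
      | (rw [pv_guard_collapse, pv_guard_collapse, pv_stage_one, pv_stage_two])
      | (rw [pv_guard_collapse, pv_stage_one])
      | (rw [pv_guard_collapse, pv_stage_two])
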